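-- pv_equiv track=rewrite | github.com/sridharRavi/water-tank-and-max-profit | Max_profit.py | max_earnings
-- ===== SOURCE A (Python) =====
-- def max_earnings(n):
--     best_earnings = 0
--     best_combo = (0, 0, 0)
--
--     for t in range(n // 5 + 1):
--         for p in range(n // 4 + 1):
--             for c in range(n // 10 + 1):
--
--                 total_time = t*5 + p*4 + c*10
--                 if total_time > n:
--                     continue
--
--                 time = 0
--                 earnings = 0
--
--                 # Theatres calculations
--                 for _ in range(t):
--                     time += 5
--                     earnings += 1500 * (n - time)
--
--                 # Pubs calculation
--                 for _ in range(p):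
--                     time += 4
--                     earnings += 1000 * (n - time)
--
--                 # Commercial Parks caluclation
--                 for _ in range(c):
--                     time += 10
--                     earnings += 2000 * (n - time)
--
--                 if earnings > best_earnings:
--                     best_earnings = earnings
--                     best_combo = (t, p, c)
--
--     return best_earnings, best_combo
-- ===== SOURCE B (Python) =====
-- def max_earnings(n):
--     # Same scan over (t, p, c) combos, but each combo's earnings come from
--     # closed-form arithmetic series instead of simulating the builds one by one.
--     best_earnings = 0
--     best_combo = (0, 0, 0)
--     for t in range(n // 5 + 1):
--         earn_t = 1500 * t * n - 3750 * t * (t + 1)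
--         for p in range(n // 4 + 1):
--             earn_tp = earn_t + 1000 * p * (n - 5 * t) - 2000 * p * (p + 1)
--             base = n - 5 * t - 4 * p
--             for c in range(n // 10 + 1):
--                 if 5 * t + 4 * p + 10 * c > n:
--                     continue
--                 earnings = earn_tp + 2000 * c * base - 10000 * c * (c + 1)
--                 if earnings > best_earnings:
--                     best_earnings = earnings
--                     best_combo = (t, p, c)
--     return best_earnings, best_combo
-- ===== Notes on version B (the rewrite author's own statement) =====
-- stated objective: faster
-- what changed: B keeps the scan over (t,p,c) combos but replaces A's inner per-building simulation loops with closed-form arithmetic-series formulas for each combo's earnings, dropping a whole loop level.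
import Mathlib
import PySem

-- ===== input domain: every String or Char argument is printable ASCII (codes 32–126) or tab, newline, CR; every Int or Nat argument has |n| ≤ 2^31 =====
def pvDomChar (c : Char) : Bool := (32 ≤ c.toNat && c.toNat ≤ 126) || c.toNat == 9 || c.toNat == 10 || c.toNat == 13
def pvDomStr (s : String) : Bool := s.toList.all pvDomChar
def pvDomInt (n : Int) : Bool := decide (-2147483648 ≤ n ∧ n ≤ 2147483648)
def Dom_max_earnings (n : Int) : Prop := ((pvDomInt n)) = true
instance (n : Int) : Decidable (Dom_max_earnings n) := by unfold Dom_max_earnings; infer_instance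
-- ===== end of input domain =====

-- B keeps A's scan over (t,p,c) combos but computes each combo's earnings by
-- closed-form arithmetic series, dropping A's inner simulation loops (O(n^4) → O(n^3)).

-- ===== PORT A =====
def max_earnings (n : Int) : Int × List Int :=
  (PySem.List.pyRange 0 (PySem.Int.floordiv n 5 + 1) 1).foldl (fun st t =>
    (PySem.List.pyRange 0 (PySem.Int.floordiv n 4 + 1) 1).foldl (fun st p =>
      (PySem.List.pyRange 0 (PySem.Int.floordiv n 10 + 1) 1).foldl (fun st c =>
        let total_time := t * 5 + p * 4 + c * 10
        if total_time > n then st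
        else
          -- time = 0; earnings = 0; then the three simulation loops of A
          let s1 := (PySem.List.pyRange 0 t 1).foldl
            (fun (s : Int × Int) _ => (s.1 + 5, s.2 + 1500 * (n - (s.1 + 5)))) (0, 0)
          let s2 := (PySem.List.pyRange 0 p 1).foldl
            (fun (s : Int × Int) _ => (s.1 + 4, s.2 + 1000 * (n - (s.1 + 4)))) s1
          let s3 := (PySem.List.pyRange 0 c 1).foldl
            (fun (s : Int × Int) _ => (s.1 + 10, s.2 + 2000 * (n - (s.1 + 10)))) s2
          if s3.2 > st.1 then (s3.2, [t, p, c]) else st) st) st)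
    (0, [0, 0, 0])

-- ===== PORT B =====
def max_earnings_alt (n : Int) : Int × List Int :=
  (PySem.List.pyRange 0 (PySem.Int.floordiv n 5 + 1) 1).foldl (fun st t =>
    let earnT := 1500 * t * n - 3750 * t * (t + 1)
    (PySem.List.pyRange 0 (PySem.Int.floordiv n 4 + 1) 1).foldl (fun st p =>
      let earnTP := earnT + 1000 * p * (n - 5 * t) - 2000 * p * (p + 1)
      let base := n - 5 * t - 4 * p
      (PySem.List.pyRange 0 (PySem.Int.floordiv n 10 + 1) 1).foldl (fun st c =>
        if 5 * t + 4 * p + 10 * c > n then st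
        else
          let earnings := earnTP + 2000 * c * base - 10000 * c * (c + 1)
          if earnings > st.1 then (earnings, [t, p, c]) else st) st) st)
    (0, [0, 0, 0])

-- ===== PRECONDITION & SPEC =====
def Spec_max_earnings (n : Int) (out : Int × List Int) : Prop := out = max_earnings_alt n
instance (n : Int) (out : Int × List Int) : Decidable (Spec_max_earnings n out) := by unfold Spec_max_earnings; infer_instance

-- ===== CLAIM (what is proved, stated in full; the proofs are below) =====
def Claim_equal_max_earnings : Prop := ∀ (n : Int), Dom_max_earnings n → Spec_max_earnings n (max_earnings n)

-- ===== LEMMAS AND PROOFS =====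

-- Closed form of one of A's simulation loops: starting at time t0 / earnings e0,
-- k steps of "time += d; earnings += mult*(n - time)", where mult*d = 2*h.
theorem pvSimLoop (n d mult h : Int) (hh : mult * d = 2 * h) (k : Nat) (t0 e0 : Int) :
    (List.range k).foldl
      (fun (s : Int × Int) _ => (s.1 + d, s.2 + mult * (n - (s.1 + d)))) (t0, e0)
    = (t0 + d * k, e0 + mult * k * (n - t0) - h * k * (k + 1)) := by
  induction k with
  | zero => simp
  | succ k ih =>
      rw [List.range_succ, List.foldl_append, ih]
      simp only [List.foldl_cons, List.foldl_nil, Prod.mk.injEq]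
      refine ⟨by push_cast; ring, by push_cast; linear_combination (-((k : Int)) - 1) * hh⟩

-- A's simulation loop over pyRange 0 m 1 (m ≥ 0), specialised to start (0,0).
theorem pvSimLoopPy (n d mult h : Int) (hh : mult * d = 2 * h) (m : Int) (t0 e0 : Int) :
    (PySem.List.pyRange 0 m 1).foldl
      (fun (s : Int × Int) _ => (s.1 + d, s.2 + mult * (n - (s.1 + d)))) (t0, e0)
    = (t0 + d * m.toNat, e0 + mult * m.toNat * (n - t0) - h * m.toNat * (m.toNat + 1)) := by
  rw [PySem.List.pyRange_one, List.foldl_map]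
  simpa using pvSimLoop n d mult h hh (m - 0).toNat t0 e0

-- ===== VERDICT (by name: the statement is the Claim_ definition above) =====
theorem max_earnings_spec : Claim_equal_max_earnings := by
  intro n _
  show max_earnings n = max_earnings_alt n
  unfold max_earnings max_earnings_alt
  refine PySem.List.foldl_congr_mem _ _ _ _ (fun st t ht => ?_)
  have ht0 : 0 ≤ t := ((PySem.List.mem_pyRange_one).1 ht).1
  refine PySem.List.foldl_congr_mem _ _ _ _ (fun st p hp => ?_)
  have hp0 : 0 ≤ p := ((PySem.List.mem_pyRange_one).1 hp).1
  refine PySem.List.foldl_congr_mem _ _ _ _ (fun st c hc => ?_)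
  have hc0 : 0 ≤ c := ((PySem.List.mem_pyRange_one).1 hc).1
  simp only []
  rw [show t * 5 + p * 4 + c * 10 = 5 * t + 4 * p + 10 * c from by ring]
  by_cases hg : 5 * t + 4 * p + 10 * c > n
  · simp [hg]
  · simp only [hg, if_false]
    rw [pvSimLoopPy n 5 1500 3750 (by norm_num),
        pvSimLoopPy n 4 1000 2000 (by norm_num),
        pvSimLoopPy n 10 2000 10000 (by norm_num)]
    have het : (t.toNat : Int) = t := Int.toNat_of_nonneg ht0
    have hep : (p.toNat : Int) = p := Int.toNat_of_nonneg hp0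
    have hec : (c.toNat : Int) = c := Int.toNat_of_nonneg hc0
    rw [het, hep, hec]
    have : (0 : Int) + 1500 * t * (n - 0) - 3750 * t * (t + 1) +
        1000 * p * (n - (0 + 5 * t)) - 2000 * p * (p + 1) +
        2000 * c * (n - (0 + 5 * t + 4 * p)) - 10000 * c * (c + 1)
        = 1500 * t * n - 3750 * t * (t + 1) + 1000 * p * (n - 5 * t) - 2000 * p * (p + 1) +
          2000 * c * (n - 5 * t - 4 * p) - 10000 * c * (c + 1) := by ring
    rw [this]
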